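-- pv_equiv track=rewrite | github.com/edoardottt/programming-fundamentals | Workbook/Sets/Sets_6/program.py | es45
-- ===== SOURCE A (Python) =====
-- def es45(parola1, parola2):
--     """
--     progettare la funzione es45(parola1,parola2) che
--     prende in input due  stringhe di caratteri parola1 e parola2, e restituisce
--     la lista delle sottostringhe che risultano in comune ad entrambe le parole.
--     La lista delle sottostringhe comuni deve essere ordinata
--     lessicograficamente e non deve contenere duplicati.
--     Si ricorda che una sottostringa e' quello che si ottiene da una stringa
--     eliminando 0 o piu' caratteri all'inizio e 0 o piu' caratteri alla fine
--
--     Ad esempio: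
--     con  parola1='aabbccdd' parola2='acccdzza' la funzione restituisce la lista [a,c,cc,ccd,cd,d]
--     """
--     ins1 = set()
--     for i in range(len(parola1)):
--         for j in range(i + 1, len(parola1) + 1):
--             ins1.add(parola1[i:j])
--     ins2 = set()
--     for i in range(len(parola2)):
--         for j in range(i + 1, len(parola2) + 1):
--             ins2.add(parola2[i:j])
--     return sorted(list(ins1 & ins2))
-- ===== SOURCE B (Python) =====
-- def es45(parola1, parola2):
--     common = set()
--     for i in range(len(parola1)):
--         suffix = parola1[i:]
--         for j in range(1, len(suffix) + 1):
--             s = suffix[:j]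
--             if s not in parola2:
--                 break
--             common.add(s)
--     return sorted(common)
-- ===== Notes on version B (the rewrite author's own statement) =====
-- stated objective: faster
-- what changed: B drops the second substring enumeration and the set intersection: it enumerates substrings of parola1 once as prefixes of each suffix, keeps a prefix only if Python's substring search `s in parola2` finds it, and breaks out of the inner loop at the first prefix absent from parola2 (no longer prefix can occur), then sorts that single set.
import Mathlib
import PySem

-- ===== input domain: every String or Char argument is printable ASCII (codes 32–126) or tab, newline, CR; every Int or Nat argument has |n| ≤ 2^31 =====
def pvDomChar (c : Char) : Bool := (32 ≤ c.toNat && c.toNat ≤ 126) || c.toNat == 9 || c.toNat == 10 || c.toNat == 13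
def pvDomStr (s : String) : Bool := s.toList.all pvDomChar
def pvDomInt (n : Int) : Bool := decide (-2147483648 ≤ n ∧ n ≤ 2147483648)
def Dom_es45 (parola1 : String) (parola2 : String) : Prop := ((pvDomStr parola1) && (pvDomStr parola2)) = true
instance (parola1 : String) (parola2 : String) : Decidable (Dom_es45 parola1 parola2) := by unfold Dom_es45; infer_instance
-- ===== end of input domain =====

-- B replaces A's second substring enumeration and set intersection by a single pass over the
-- substrings of parola1 (prefixes of each suffix) kept only if `s in parola2`, breaking out of the
-- inner loop at the first prefix not occurring in parola2 (objective: faster).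

-- ===== PORT A =====
def es45 (parola1 : String) (parola2 : String) : List String :=
  let ins1 : PySem.Set String :=
    (PySem.List.pyRange 0 (PySem.Str.len parola1) 1).foldl (fun ins1 i =>
      (PySem.List.pyRange (i + 1) (PySem.Str.len parola1 + 1) 1).foldl (fun ins1 j =>
        PySem.Set.add ins1 (PySem.Str.slice parola1 (some i) (some j))) ins1)
      PySem.Set.empty
  let ins2 : PySem.Set String :=
    (PySem.List.pyRange 0 (PySem.Str.len parola2) 1).foldl (fun ins2 i =>
      (PySem.List.pyRange (i + 1) (PySem.Str.len parola2 + 1) 1).foldl (fun ins2 j =>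
        PySem.Set.add ins2 (PySem.Str.slice parola2 (some i) (some j))) ins2)
      PySem.Set.empty
  PySem.List.sorted (PySem.Set.inter ins1 ins2) (fun x => x) false

-- ===== PORT B =====
-- inner loop 'for j in range(1, len(suffix)+1): s = suffix[:j]; if s not in parola2: break; common.add(s)'
def es45InnerLoop (suffix : String) (parola2 : String) (js : List Int) (common : PySem.Set String) : PySem.Set String :=
  match js with
  | [] => common
  | j :: rest =>
    let s := PySem.Str.slice suffix none (some j)
    if PySem.Str.isIn s parola2 then es45InnerLoop suffix parola2 rest (PySem.Set.add common s)
    else common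

def es45_alt (parola1 : String) (parola2 : String) : List String :=
  let common : PySem.Set String :=
    (PySem.List.pyRange 0 (PySem.Str.len parola1) 1).foldl (fun common i =>
      let suffix := PySem.Str.slice parola1 (some i) none
      es45InnerLoop suffix parola2 (PySem.List.pyRange 1 (PySem.Str.len suffix + 1) 1) common)
      PySem.Set.empty
  PySem.List.sorted common (fun x => x) false

-- ===== PRECONDITION & SPEC =====
def Spec_es45 (parola1 : String) (parola2 : String) (out : List String) : Prop := out = es45_alt parola1 parola2
instance (parola1 : String) (parola2 : String) (out : List String) : Decidable (Spec_es45 parola1 parola2 out) := by unfold Spec_es45; infer_instance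

-- ===== CLAIM (what is proved, stated in full; the proofs are below) =====
def Claim_equal_es45 : Prop := ∀ (parola1 : String) (parola2 : String), Dom_es45 parola1 parola2 → Spec_es45 parola1 parola2 (es45 parola1 parola2)

-- ===== LEMMAS AND PROOFS =====

-- a foldl whose every step preserves Nodup preserves Nodup
theorem pv_nodup_foldl {β : Type} (step : PySem.Set String → β → PySem.Set String)
    (h : ∀ s x, List.Nodup s → List.Nodup (step s x)) :
    ∀ (l : List β) (init : PySem.Set String), List.Nodup init → List.Nodup (l.foldl step init) := by
  intro l
  induction l with
  | nil => intro init hi; simpa using hi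
  | cons a t ih => intro init hi; exact ih _ (h _ _ hi)

-- membership in A's nested substring-collecting loop
theorem pv_mem_foldl_foldl_add {β γ : Type} (l : List β) (inner : β → List γ)
    (f : β → γ → String) (init : PySem.Set String) (y : String) :
    y ∈ l.foldl (fun s i => (inner i).foldl (fun s j => PySem.Set.add s (f i j)) s) init ↔
      y ∈ init ∨ ∃ i ∈ l, ∃ j ∈ inner i, y = f i j := by
  induction l generalizing init with
  | nil => simp
  | cons a t ih =>
    rw [List.foldl_cons, ih, PySem.Set.mem_foldl_add]
    simp only [List.mem_cons]
    aesop

-- a generic outer fold whose step's membership is characterized pointwise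
theorem pv_mem_foldl_step {β : Type} (l : List β)
    (step : PySem.Set String → β → PySem.Set String) (R : β → String → Prop)
    (hstep : ∀ i ∈ l, ∀ c y, y ∈ step c i ↔ y ∈ c ∨ R i y) (init : PySem.Set String) (y : String) :
    y ∈ l.foldl step init ↔ y ∈ init ∨ ∃ i ∈ l, R i y := by
  induction l generalizing init with
  | nil => simp
  | cons a t ih =>
    rw [List.foldl_cons, ih (fun i hi => hstep i (List.mem_cons_of_mem a hi)),
      hstep a (List.mem_cons_self)]
    simp only [List.mem_cons]
    aesop

-- extending a prefix of suffix cannot create an occurrence in parola2 that was absent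
theorem pv_isIn_take_mono (suffix parola2 : String) {a b : Int} (h0 : 0 ≤ a) (hab : a ≤ b)
    (hb : PySem.Str.isIn (PySem.Str.slice suffix none (some b)) parola2 = true) :
    PySem.Str.isIn (PySem.Str.slice suffix none (some a)) parola2 = true := by
  rw [PySem.Str.isIn_iff_infix] at hb ⊢
  rw [PySem.Str.toList_slice, PySem.Chars.slice_eq_listSlice,
    PySem.List.slice_to _ h0]
  rw [PySem.Str.toList_slice, PySem.Chars.slice_eq_listSlice,
    PySem.List.slice_to _ (le_trans h0 hab)] at hb
  have htt : List.take a.toNat suffix.toList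
      = List.take a.toNat (List.take b.toNat suffix.toList) := by
    rw [List.take_take, min_eq_left (by omega)]
  rw [htt]
  exact (List.take_prefix _ _).isInfix.trans hb

-- membership in B's inner loop with break: the loop stops at the first prefix not found in
-- parola2, and by pv_isIn_take_mono no later prefix is found either
theorem pv_mem_innerLoop (suffix parola2 : String) (js : List Int)
    (hnn : ∀ j ∈ js, 0 ≤ j) (hpw : js.Pairwise (· ≤ ·)) (c : PySem.Set String) (y : String) :
    y ∈ es45InnerLoop suffix parola2 js c ↔
      y ∈ c ∨ ∃ j ∈ js, PySem.Str.isIn (PySem.Str.slice suffix none (some j)) parola2 = true ∧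
        y = PySem.Str.slice suffix none (some j) := by
  induction js generalizing c with
  | nil => simp [es45InnerLoop]
  | cons a t ih =>
    obtain ⟨hle, hpw'⟩ := List.pairwise_cons.mp hpw
    by_cases hQ : PySem.Str.isIn (PySem.Str.slice suffix none (some a)) parola2 = true
    · have hunf : es45InnerLoop suffix parola2 (a :: t) c
          = es45InnerLoop suffix parola2 t (PySem.Set.add c (PySem.Str.slice suffix none (some a))) := by
        simp only [es45InnerLoop]
        rw [if_pos hQ]
      rw [hunf]
      rw [ih (fun j hj => hnn j (List.mem_cons_of_mem a hj)) hpw']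
      simp only [PySem.Set.mem_add, List.mem_cons]
      aesop
    · have hunf : es45InnerLoop suffix parola2 (a :: t) c = c := by
        simp only [es45InnerLoop]
        rw [if_neg hQ]
      rw [hunf]
      simp only [List.mem_cons]
      constructor
      · exact Or.inl
      · rintro (h | ⟨j, hj, hQj, hy⟩)
        · exact h
        · exfalso
          cases hj with
          | inl hj => subst hj; exact hQ hQj
          | inr hj =>
            exact hQ (pv_isIn_take_mono suffix parola2 (hnn a List.mem_cons_self) (hle j hj) hQj)

-- the inner loop only adds elements, preserving Nodup
theorem pv_nodup_innerLoop (suffix parola2 : String) (js : List Int) (c : PySem.Set String)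
    (hc : List.Nodup c) : List.Nodup (es45InnerLoop suffix parola2 js c) := by
  induction js generalizing c with
  | nil => simpa [es45InnerLoop] using hc
  | cons a t ih =>
    simp only [es45InnerLoop]
    split
    · exact ih _ (PySem.Set.nodup_add _ _ hc)
    · exact hc

-- nonempty-substring characterization of A's candidate (i, j)
theorem pv_subsA_iff (p : String) (y : String) :
    (∃ i ∈ PySem.List.pyRange 0 (PySem.Str.len p) 1,
       ∃ j ∈ PySem.List.pyRange (i + 1) (PySem.Str.len p + 1) 1,
         y = PySem.Str.slice p (some i) (some j)) ↔
      y.toList ≠ [] ∧ y.toList <:+: p.toList := by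
  constructor
  · rintro ⟨i, hi, j, hj, rfl⟩
    rw [PySem.List.mem_pyRange_one, PySem.Str.len_eq] at hi hj
    obtain ⟨hi0, hiN⟩ := hi
    obtain ⟨hij, hjN⟩ := hj
    have h0j : (0 : Int) ≤ j := by omega
    have hslice : (PySem.Str.slice p (some i) (some j)).toList
        = List.take (j.toNat - i.toNat) (List.drop i.toNat p.toList) := by
      rw [PySem.Str.toList_slice, PySem.Chars.slice_eq_listSlice,
        PySem.List.slice_toNat p.toList hi0 h0j]
    rw [hslice]
    constructor
    · intro hnil
      have hlen := congrArg List.length hnil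
      simp only [List.length_take, List.length_drop, List.length_nil] at hlen
      omega
    · exact (List.take_prefix _ _).isInfix.trans (List.drop_suffix _ _).isInfix
  · rintro ⟨hne, hinfix⟩
    obtain ⟨t, hpre, hsuf⟩ := List.infix_iff_prefix_suffix.mp hinfix
    have hy : y.toList = List.take y.toList.length t := List.prefix_iff_eq_take.mp hpre
    have ht : t = List.drop (p.toList.length - t.length) p.toList := List.suffix_iff_eq_drop.mp hsuf
    have hylen : 1 ≤ y.toList.length := by
      cases h : y.toList with
      | nil => exact absurd h hne
      | cons a l => simp
    have hyt : y.toList.length ≤ t.length := hpre.length_le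
    have htp : t.length ≤ p.toList.length := hsuf.length_le
    set d : Nat := p.toList.length - t.length with hd
    refine ⟨(d : Int), ?_, (d : Int) + (y.toList.length : Int), ?_, ?_⟩
    · rw [PySem.List.mem_pyRange_one, PySem.Str.len_eq]; omega
    · rw [PySem.List.mem_pyRange_one, PySem.Str.len_eq]; omega
    · have h0d : (0 : Int) ≤ (d : Int) := by omega
      have h0j : (0 : Int) ≤ (d : Int) + (y.toList.length : Int) := by omega
      apply String.toList_inj.mp
      rw [PySem.Str.toList_slice, PySem.Chars.slice_eq_listSlice,
        PySem.List.slice_toNat p.toList h0d h0j]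
      have harith : ((d : Int) + (y.toList.length : Int)).toNat - ((d : Int)).toNat
          = y.toList.length := by omega
      rw [harith, Int.toNat_natCast, ← ht, ← hy]
-- (the ← ht step uses that drop d p.toList = t)

-- nonempty-substring-with-test characterization of B's candidate (i, j)
theorem pv_subsB_iff (p : String) (q : String) (y : String) :
    (∃ i ∈ PySem.List.pyRange 0 (PySem.Str.len p) 1,
       ∃ j ∈ PySem.List.pyRange 1 (PySem.Str.len (PySem.Str.slice p (some i) none) + 1) 1,
         PySem.Str.isIn (PySem.Str.slice (PySem.Str.slice p (some i) none) none (some j)) q = true ∧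
         y = PySem.Str.slice (PySem.Str.slice p (some i) none) none (some j)) ↔
      (y.toList ≠ [] ∧ y.toList <:+: p.toList) ∧ y.toList <:+: q.toList := by
  constructor
  · rintro ⟨i, hi, j, hj, hP, rfl⟩
    rw [PySem.List.mem_pyRange_one, PySem.Str.len_eq] at hi
    obtain ⟨hi0, hiN⟩ := hi
    have hsuffix : (PySem.Str.slice p (some i) none).toList = List.drop i.toNat p.toList := by
      rw [PySem.Str.toList_slice, PySem.Chars.slice_eq_listSlice,
        PySem.List.slice_from p.toList hi0]
    rw [PySem.List.mem_pyRange_one, PySem.Str.len_eq, hsuffix] at hj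
    obtain ⟨hj1, hjN⟩ := hj
    have h0j : (0 : Int) ≤ j := by omega
    have hslice : (PySem.Str.slice (PySem.Str.slice p (some i) none) none (some j)).toList
        = List.take j.toNat (List.drop i.toNat p.toList) := by
      rw [PySem.Str.toList_slice, PySem.Chars.slice_eq_listSlice,
        PySem.List.slice_to _ h0j, hsuffix]
    refine ⟨⟨?_, ?_⟩, ?_⟩
    · rw [hslice]
      intro hnil
      have hlen := congrArg List.length hnil
      simp only [List.length_take, List.length_drop, List.length_nil] at hlen
      omega
    · rw [hslice]
      exact (List.take_prefix _ _).isInfix.trans (List.drop_suffix _ _).isInfix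
    · rw [PySem.Str.isIn_iff_infix] at hP
      exact hP
  · rintro ⟨⟨hne, hinfix⟩, hq⟩
    obtain ⟨t, hpre, hsuf⟩ := List.infix_iff_prefix_suffix.mp hinfix
    have hy : y.toList = List.take y.toList.length t := List.prefix_iff_eq_take.mp hpre
    have ht : t = List.drop (p.toList.length - t.length) p.toList := List.suffix_iff_eq_drop.mp hsuf
    have hylen : 1 ≤ y.toList.length := by
      cases h : y.toList with
      | nil => exact absurd h hne
      | cons a l => simp
    have hyt : y.toList.length ≤ t.length := hpre.length_le
    have htp : t.length ≤ p.toList.length := hsuf.length_le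
    set d : Nat := p.toList.length - t.length with hd
    have h0d : (0 : Int) ≤ (d : Int) := by omega
    have hsuffix : (PySem.Str.slice p (some (d : Int)) none).toList = List.drop d p.toList := by
      rw [PySem.Str.toList_slice, PySem.Chars.slice_eq_listSlice,
        PySem.List.slice_from p.toList h0d, Int.toNat_natCast]
    have h0j : (0 : Int) ≤ (y.toList.length : Int) := by omega
    have hyval : PySem.Str.slice (PySem.Str.slice p (some (d : Int)) none) none
        (some (y.toList.length : Int)) = y := by
      apply String.toList_inj.mp
      rw [PySem.Str.toList_slice, PySem.Chars.slice_eq_listSlice,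
        PySem.List.slice_to _ h0j, hsuffix, Int.toNat_natCast, ← ht, ← hy]
    refine ⟨(d : Int), ?_, (y.toList.length : Int), ?_, ?_, ?_⟩
    · rw [PySem.List.mem_pyRange_one, PySem.Str.len_eq]; omega
    · rw [PySem.List.mem_pyRange_one, PySem.Str.len_eq, hsuffix]
      simp only [List.length_drop]
      omega
    · rw [hyval, PySem.Str.isIn_iff_infix]; exact hq
    · rw [hyval]

theorem pv_nodup_A_set (p : String) :
    List.Nodup ((PySem.List.pyRange 0 (PySem.Str.len p) 1).foldl (fun s i =>
      (PySem.List.pyRange (i + 1) (PySem.Str.len p + 1) 1).foldl (fun s j =>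
        PySem.Set.add s (PySem.Str.slice p (some i) (some j))) s) PySem.Set.empty) := by
  apply pv_nodup_foldl
  · intro s i hs
    apply pv_nodup_foldl
    · intro s' j hs'; exact PySem.Set.nodup_add _ _ hs'
    · exact hs
  · exact List.nodup_nil

theorem pv_nodup_B_set (p q : String) :
    List.Nodup ((PySem.List.pyRange 0 (PySem.Str.len p) 1).foldl (fun s i =>
      es45InnerLoop (PySem.Str.slice p (some i) none) q
        (PySem.List.pyRange 1 (PySem.Str.len (PySem.Str.slice p (some i) none) + 1) 1) s)
      PySem.Set.empty) := by
  apply pv_nodup_foldl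
  · intro s i hs
    exact pv_nodup_innerLoop _ _ _ _ hs
  · exact List.nodup_nil

-- ===== VERDICT (by name: the statement is the Claim_ definition above) =====
theorem es45_spec : Claim_equal_es45 := by
  intro parola1 parola2 _
  unfold Spec_es45 es45 es45_alt
  apply PySem.List.sorted_eq_sorted_of_perm _ _ (fun x => x) (fun a b h => h)
  rw [List.perm_ext_iff_of_nodup
    (PySem.Set.nodup_inter _ _ (pv_nodup_A_set parola1)) (pv_nodup_B_set parola1 parola2)]
  intro y
  rw [PySem.Set.mem_inter, pv_mem_foldl_foldl_add, pv_mem_foldl_foldl_add,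
    pv_mem_foldl_step _ _
      (fun i y => ∃ j ∈ PySem.List.pyRange 1 (PySem.Str.len (PySem.Str.slice parola1 (some i) none) + 1) 1,
        PySem.Str.isIn (PySem.Str.slice (PySem.Str.slice parola1 (some i) none) none (some j)) parola2 = true ∧
        y = PySem.Str.slice (PySem.Str.slice parola1 (some i) none) none (some j))
      (fun i _ c y => pv_mem_innerLoop _ _ _
        (fun j hj => by have := PySem.List.mem_pyRange_one.mp hj; omega)
        ((PySem.List.pairwise_lt_pyRange_one _ _).imp le_of_lt) c y)]
  rw [pv_subsA_iff parola1 y, pv_subsA_iff parola2 y, pv_subsB_iff parola1 parola2 y]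
  simp only [PySem.Set.empty, List.not_mem_nil, false_or]
  tauto
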